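-- pv_equiv track=rewrite | github.com/lawrenceli79/CompHokenTxt_Calc | CompHokenTxt_Calc.py | CompareBlockCore
-- ===== SOURCE A (Python) =====
-- def CompareBlockCore(lines1:list[str], start1:int, lines2:list[str], start2:int, strEndLine:str):
--     bSame = True
--     nMaxCnt1 = len(lines1)-start1
--     nMaxCnt2 = len(lines2)-start2
--     nMaxCnt = min(nMaxCnt1,nMaxCnt2)
--
--     for i in range(0, nMaxCnt):
--         line1 = lines1[i+start1]
--         line2 = lines2[i+start2]
--         if (line1==strEndLine and line2==strEndLine):
--             break
--         elif (line1==strEndLine or line2==strEndLine):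
--             bSame = False
--             break
--         elif (line1!=line2):
--             bSame = False
--             break
--     return bSame
-- ===== SOURCE B (Python) =====
-- def CompareBlockCore(lines1: list[str], start1: int, lines2: list[str], start2: int, strEndLine: str):
--     n = max(0, min(len(lines1) - start1, len(lines2) - start2))
--     a = lines1[start1:start1 + n]
--     b = lines2[start2:start2 + n]
--     k1 = a.index(strEndLine) if strEndLine in a else n
--     k2 = b.index(strEndLine) if strEndLine in b else n
--     k = min(k1, k2)
--     return a[:k] == b[:k] and (k == n or (a[k] == strEndLine and b[k] == strEndLine))
-- ===== Notes on version B (the rewrite author's own statement) =====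
-- stated objective: alternative
-- what changed: Replaces the fused per-element branch-and-break scan with a locate-then-compare decomposition: take the two length-clamped slices, find the first end-marker position in each, and compare the prefixes up to the earlier marker plus a boundary check.
-- outside the precondition, e.g. on CompareBlockCore(['x'], -1, ['x'], 0, 'E'): A returns True, B returns False
import Mathlib
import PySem

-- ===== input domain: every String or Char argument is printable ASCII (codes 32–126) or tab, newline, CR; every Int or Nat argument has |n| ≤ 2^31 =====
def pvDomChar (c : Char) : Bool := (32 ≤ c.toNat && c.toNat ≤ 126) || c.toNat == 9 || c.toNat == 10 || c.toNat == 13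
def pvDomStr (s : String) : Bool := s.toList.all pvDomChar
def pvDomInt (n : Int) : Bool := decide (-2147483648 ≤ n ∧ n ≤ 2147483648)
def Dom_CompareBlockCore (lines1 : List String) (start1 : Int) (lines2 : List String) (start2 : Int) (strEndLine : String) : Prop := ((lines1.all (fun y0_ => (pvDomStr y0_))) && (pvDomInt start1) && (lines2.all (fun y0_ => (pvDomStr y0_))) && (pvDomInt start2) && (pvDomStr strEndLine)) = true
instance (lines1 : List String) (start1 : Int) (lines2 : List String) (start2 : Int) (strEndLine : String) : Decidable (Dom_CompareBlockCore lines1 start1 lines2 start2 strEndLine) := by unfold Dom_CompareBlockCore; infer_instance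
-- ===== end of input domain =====

-- B replaces A's fused per-element branch-and-break scan with a locate-markers-then-compare-prefix-slices decomposition (alternative, same cost).


-- ===== PORT A =====
-- the for-loop with its three break branches, recursing over the range list of indices
def pvALoop (lines1 : List String) (start1 : Int) (lines2 : List String) (start2 : Int) (strEndLine : String) : List Int → Bool
  | [] => true
  | i :: rest =>
    match PySem.List.pyGet? lines1 (i + start1), PySem.List.pyGet? lines2 (i + start2) with
    | some line1, some line2 =>
      if line1 = strEndLine ∧ line2 = strEndLine then true
      else if line1 = strEndLine ∨ line2 = strEndLine then false
      else if line1 ≠ line2 then false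
      else pvALoop lines1 start1 lines2 start2 strEndLine rest
    | _, _ => false  -- IndexError (negative-index underflow); excluded by Pre_

def CompareBlockCore (lines1 : List String) (start1 : Int) (lines2 : List String) (start2 : Int) (strEndLine : String) : Bool :=
  let nMaxCnt1 : Int := (lines1.length : Int) - start1
  let nMaxCnt2 : Int := (lines2.length : Int) - start2
  let nMaxCnt : Int := min nMaxCnt1 nMaxCnt2
  pvALoop lines1 start1 lines2 start2 strEndLine (PySem.List.pyRange 0 nMaxCnt 1)

-- ===== PORT B =====
-- "xs.index(e) if e in xs else n" (one Python conditional expression)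
def pvK (e : String) (xs : List String) (n : Int) : Int :=
  match PySem.List.index? xs e with | some j => (j : Int) | none => n

def CompareBlockCore_alt (lines1 : List String) (start1 : Int) (lines2 : List String) (start2 : Int) (strEndLine : String) : Bool :=
  let n : Int := max 0 (min ((lines1.length : Int) - start1) ((lines2.length : Int) - start2))
  let a := PySem.List.slice lines1 (some start1) (some (start1 + n))
  let b := PySem.List.slice lines2 (some start2) (some (start2 + n))
  let k1 : Int := pvK strEndLine a n
  let k2 : Int := pvK strEndLine b n
  let k : Int := min k1 k2
  decide (PySem.List.slice a none (some k) = PySem.List.slice b none (some k)) &&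
    (k == n || (PySem.List.pyGet? a k == some strEndLine && PySem.List.pyGet? b k == some strEndLine))

-- ===== PRECONDITION & SPEC =====
-- Pre_ admits the function's natural domain of non-negative start indices, plus every input whose comparison
-- range is empty (both trivially return True); what it excludes is a negative start with a non-empty range,
-- where A reads the lists circularly via Python's negative-index wraparound (or raises IndexError below -len),
-- an accident of A's implementation that no caller of this line-block comparator relies on (B itself raises
-- IndexError on part of that region).
def Pre_CompareBlockCore (lines1 : List String) (start1 : Int) (lines2 : List String) (start2 : Int) (strEndLine : String) : Prop :=
  (0 ≤ start1 ∧ 0 ≤ start2) ∨ min ((lines1.length : Int) - start1) ((lines2.length : Int) - start2) ≤ 0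
instance (lines1 : List String) (start1 : Int) (lines2 : List String) (start2 : Int) (strEndLine : String) : Decidable (Pre_CompareBlockCore lines1 start1 lines2 start2 strEndLine) := by unfold Pre_CompareBlockCore; infer_instance

def pvWitness_CompareBlockCore : List String × Int × List String × Int × String := (["a", "END", "b"], 0, ["a", "END", "c"], 0, "END")

def Spec_CompareBlockCore (lines1 : List String) (start1 : Int) (lines2 : List String) (start2 : Int) (strEndLine : String) (out : Bool) : Prop := out = CompareBlockCore_alt lines1 start1 lines2 start2 strEndLine
instance (lines1 : List String) (start1 : Int) (lines2 : List String) (start2 : Int) (strEndLine : String) (out : Bool) : Decidable (Spec_CompareBlockCore lines1 start1 lines2 start2 strEndLine out) := by unfold Spec_CompareBlockCore; infer_instance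

-- ===== CLAIM (what is proved, stated in full; the proofs are below) =====
def Claim_equal_CompareBlockCore : Prop := ∀ (lines1 : List String) (start1 : Int) (lines2 : List String) (start2 : Int) (strEndLine : String), Dom_CompareBlockCore lines1 start1 lines2 start2 strEndLine → Pre_CompareBlockCore lines1 start1 lines2 start2 strEndLine → Spec_CompareBlockCore lines1 start1 lines2 start2 strEndLine (CompareBlockCore lines1 start1 lines2 start2 strEndLine)

-- ===== LEMMAS AND PROOFS =====

-- common reference function: elementwise comparison with the end-marker rule
def pvCmp (e : String) : List String → List String → Bool
  | [], _ => true
  | _, [] => true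
  | x :: xs, y :: ys =>
    if x = e ∧ y = e then true
    else if x = e ∨ y = e then false
    else if x ≠ y then false
    else pvCmp e xs ys

-- A's loop over any in-bounds index range computes pvCmp on the two sub-blocks
theorem pvALoop_eq_pvCmp (l1 l2 : List String) (s1 s2 : Int) (e : String)
    (hs1 : 0 ≤ s1) (hs2 : 0 ≤ s2) :
    ∀ (k : Nat) (a b : Int), 0 ≤ a → b - a = (k : Int) →
      b + s1 ≤ (l1.length : Int) → b + s2 ≤ (l2.length : Int) →
      pvALoop l1 s1 l2 s2 e (PySem.List.pyRange a b 1) =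
        pvCmp e ((l1.drop (s1 + a).toNat).take k) ((l2.drop (s2 + a).toNat).take k) := by
  intro k
  induction k with
  | zero =>
    intro a b ha hba h1 h2
    rw [PySem.List.pyRange_one_eq_nil (by omega)]
    simp [pvALoop, pvCmp]
  | succ k ih =>
    intro a b ha hba h1 h2
    rw [PySem.List.pyRange_one_cons (by omega : a < b)]
    have hm1 : (s1 + a).toNat < l1.length := by omega
    have hm2 : (s2 + a).toNat < l2.length := by omega
    have hg1 : PySem.List.pyGet? l1 (a + s1) = some (l1[(s1 + a).toNat]) := by
      rw [PySem.List.pyGet?_of_nonneg _ (by omega)]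
      rw [show (a + s1).toNat = (s1 + a).toNat by omega]
      exact List.getElem?_eq_getElem hm1
    have hg2 : PySem.List.pyGet? l2 (a + s2) = some (l2[(s2 + a).toNat]) := by
      rw [PySem.List.pyGet?_of_nonneg _ (by omega)]
      rw [show (a + s2).toNat = (s2 + a).toNat by omega]
      exact List.getElem?_eq_getElem hm2
    rw [List.drop_eq_getElem_cons hm1, List.drop_eq_getElem_cons hm2]
    simp only [List.take_succ_cons]
    simp only [pvALoop, hg1, hg2, pvCmp]
    have ha' : (s1 + a).toNat + 1 = (s1 + (a + 1)).toNat := by omega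
    have hb' : (s2 + a).toNat + 1 = (s2 + (a + 1)).toNat := by omega
    rw [ha', hb', ih (a+1) b (by omega) (by omega) h1 h2]

def pvAltCore (e : String) (a b : List String) : Bool :=
  let n : Int := (a.length : Int)
  let k : Int := min (pvK e a n) (pvK e b n)
  decide (PySem.List.slice a none (some k) = PySem.List.slice b none (some k)) &&
    (k == n || (PySem.List.pyGet? a k == some e && PySem.List.pyGet? b k == some e))

theorem pvK_cons_self (e : String) (xs : List String) (n : Int) : pvK e (e :: xs) n = 0 := by
  simp only [pvK, PySem.List.index?_cons_self]; rfl

theorem pvK_cons_of_ne (e x : String) (xs : List String) (n : Int) (hx : x ≠ e) :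
    pvK e (x :: xs) (n + 1) = pvK e xs n + 1 := by
  simp only [pvK, PySem.List.index?_cons_of_ne xs hx]
  cases PySem.List.index? xs e <;> simp

theorem pvK_nonneg (e : String) (xs : List String) (n : Int) (hn : 0 ≤ n) : 0 ≤ pvK e xs n := by
  simp only [pvK]; cases PySem.List.index? xs e <;> simp [hn]

-- B's locate-then-compare body computes pvCmp on two equal-length blocks
theorem pvAltCore_eq_pvCmp (e : String) :
    ∀ (a b : List String), a.length = b.length → pvAltCore e a b = pvCmp e a b := by
  intro a
  induction a with
  | nil =>
    intro b hb
    have hbnil : b = [] := List.eq_nil_of_length_eq_zero hb.symm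
    subst hbnil
    simp [pvAltCore, pvK, pvCmp]
  | cons x xs ih =>
    intro b hb
    cases b with
    | nil => simp at hb
    | cons y ys =>
      have hlen : xs.length = ys.length := by simpa using hb
      have hn : ((x :: xs).length : Int) = (xs.length : Int) + 1 := by simp
      by_cases hx : x = e
      · by_cases hy : y = e
        · subst hx; subst hy
          simp only [pvAltCore]
          simp only [pvK_cons_self]
          simp [pvCmp, PySem.List.slice_to]
        · subst hx
          simp only [pvAltCore]
          simp only [pvK_cons_self]
          have h2 : 0 ≤ pvK x (y :: ys) ((x :: xs).length : Int) := pvK_nonneg _ _ _ (by positivity)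
          rw [show min 0 (pvK x (y :: ys) ((x :: xs).length : Int)) = 0 by omega]
          simp [pvCmp, PySem.List.slice_to, hy]
          omega
      · by_cases hy : y = e
        · subst hy
          simp only [pvAltCore]
          simp only [pvK_cons_self]
          have h1 : 0 ≤ pvK y (x :: xs) ((x :: xs).length : Int) := pvK_nonneg _ _ _ (by positivity)
          rw [show min (pvK y (x :: xs) ((x :: xs).length : Int)) 0 = 0 by omega]
          simp [pvCmp, PySem.List.slice_to, hx]
          omega
        · simp only [pvAltCore]
          rw [hn, pvK_cons_of_ne e x xs _ hx, pvK_cons_of_ne e y ys _ hy]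
          have hk1 : 0 ≤ pvK e xs (xs.length : Int) := pvK_nonneg _ _ _ (by positivity)
          have hk2 : 0 ≤ pvK e ys (xs.length : Int) := pvK_nonneg _ _ _ (by positivity)
          set k' : Int := min (pvK e xs (xs.length : Int)) (pvK e ys (xs.length : Int)) with hk'
          have hmin : min (pvK e xs (xs.length : Int) + 1) (pvK e ys (xs.length : Int) + 1) = k' + 1 := by omega
          rw [hmin]
          have hk'0 : 0 ≤ k' := by omega
          have hslice1 : PySem.List.slice (x :: xs) none (some (k' + 1)) = x :: List.take k'.toNat xs := by
            rw [PySem.List.slice_to _ (by omega)]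
            rw [show (k' + 1).toNat = k'.toNat + 1 by omega]
            simp
          have hslice2 : PySem.List.slice (y :: ys) none (some (k' + 1)) = y :: List.take k'.toNat ys := by
            rw [PySem.List.slice_to _ (by omega)]
            rw [show (k' + 1).toNat = k'.toNat + 1 by omega]
            simp
          rw [hslice1, hslice2]
          have hget1 : PySem.List.pyGet? (x :: xs) (k' + 1) = PySem.List.pyGet? xs k' := by
            rw [show k' = (k'.toNat : Int) by omega, PySem.List.pyGet?_cons_succ]
          have hget2 : PySem.List.pyGet? (y :: ys) (k' + 1) = PySem.List.pyGet? ys k' := by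
            rw [show k' = (k'.toNat : Int) by omega, PySem.List.pyGet?_cons_succ]
          rw [hget1, hget2]
          by_cases hxy : x = y
          · subst hxy
            have heq : (k' + 1 == (xs.length : Int) + 1) = (k' == (xs.length : Int)) := by
              cases h : (k' == (xs.length : Int)) <;> simp_all
            rw [heq]
            have hcons : (decide (x :: List.take k'.toNat xs = x :: List.take k'.toNat ys)) = decide (List.take k'.toNat xs = List.take k'.toNat ys) := by simp
            rw [hcons]
            have hrec := ih ys hlen
            simp only [pvAltCore] at hrec
            rw [PySem.List.slice_to _ hk'0, PySem.List.slice_to _ hk'0, ← hk'] at hrec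
            rw [hrec]
            simp [pvCmp, hx]
          · have hdec : (decide (x :: List.take k'.toNat xs = y :: List.take k'.toNat ys)) = false := by
              simp [hxy]
            rw [hdec]
            simp [pvCmp, hx, hy, hxy]

-- ===== VERDICT (by name: the statement is the Claim_ definition above) =====
theorem CompareBlockCore_spec : Claim_equal_CompareBlockCore := by
  intro l1 s1 l2 s2 e _hdom hpre
  unfold Spec_CompareBlockCore
  simp only [CompareBlockCore, CompareBlockCore_alt]
  set M : Int := min ((l1.length : Int) - s1) ((l2.length : Int) - s2) with hM
  by_cases hMneg : M ≤ 0
  · rw [PySem.List.pyRange_one_eq_nil hMneg]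
    rw [show max 0 M = 0 by omega]
    rw [show s1 + (0:Int) = s1 by omega, show s2 + (0:Int) = s2 by omega]
    have h1 : PySem.List.slice l1 (some s1) (some s1) = [] := by
      apply List.eq_nil_of_length_eq_zero
      rw [PySem.List.length_slice]; omega
    have h2 : PySem.List.slice l2 (some s2) (some s2) = [] := by
      apply List.eq_nil_of_length_eq_zero
      rw [PySem.List.length_slice]; omega
    rw [h1, h2]
    simp [pvALoop, pvK, PySem.List.slice_to]
  · obtain ⟨hs1, hs2⟩ : 0 ≤ s1 ∧ 0 ≤ s2 := by
      rcases hpre with h | h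
      · exact h
      · exact absurd (by omega : M ≤ 0) hMneg
    have hM0 : 0 ≤ M := by omega
    rw [show max 0 M = M by omega]
    have hA : PySem.List.slice l1 (some s1) (some (s1 + M)) = (l1.drop s1.toNat).take M.toNat := by
      rw [PySem.List.slice_toNat _ hs1 (by omega)]
      rw [show (s1 + M).toNat - s1.toNat = M.toNat by omega]
    have hB : PySem.List.slice l2 (some s2) (some (s2 + M)) = (l2.drop s2.toNat).take M.toNat := by
      rw [PySem.List.slice_toNat _ hs2 (by omega)]
      rw [show (s2 + M).toNat - s2.toNat = M.toNat by omega]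
    rw [hA, hB]
    have hlenA : ((l1.drop s1.toNat).take M.toNat).length = M.toNat := by
      simp; omega
    have hlenB : ((l2.drop s2.toNat).take M.toNat).length = M.toNat := by
      simp; omega
    have hright : (decide (PySem.List.slice ((l1.drop s1.toNat).take M.toNat) none
          (some (min (pvK e ((l1.drop s1.toNat).take M.toNat) M) (pvK e ((l2.drop s2.toNat).take M.toNat) M))) =
        PySem.List.slice ((l2.drop s2.toNat).take M.toNat) none
          (some (min (pvK e ((l1.drop s1.toNat).take M.toNat) M) (pvK e ((l2.drop s2.toNat).take M.toNat) M)))) &&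
        (min (pvK e ((l1.drop s1.toNat).take M.toNat) M) (pvK e ((l2.drop s2.toNat).take M.toNat) M) == M ||
          (PySem.List.pyGet? ((l1.drop s1.toNat).take M.toNat)
              (min (pvK e ((l1.drop s1.toNat).take M.toNat) M) (pvK e ((l2.drop s2.toNat).take M.toNat) M)) == some e &&
            PySem.List.pyGet? ((l2.drop s2.toNat).take M.toNat)
              (min (pvK e ((l1.drop s1.toNat).take M.toNat) M) (pvK e ((l2.drop s2.toNat).take M.toNat) M)) == some e))) =
        pvAltCore e ((l1.drop s1.toNat).take M.toNat) ((l2.drop s2.toNat).take M.toNat) := by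
      simp only [pvAltCore, pvK]
      rw [hlenA, show ((M.toNat : Int)) = M by omega]
    rw [show (pvALoop l1 s1 l2 s2 e (PySem.List.pyRange 0 M 1)) =
        pvCmp e ((l1.drop (s1 + 0).toNat).take M.toNat) ((l2.drop (s2 + 0).toNat).take M.toNat) from
      pvALoop_eq_pvCmp l1 l2 s1 s2 e hs1 hs2 M.toNat 0 M (by omega) (by omega) (by omega) (by omega)]
    rw [show (s1 + (0:Int)).toNat = s1.toNat by omega, show (s2 + (0:Int)).toNat = s2.toNat by omega]
    rw [hright, pvAltCore_eq_pvCmp e _ _ (by rw [hlenA, hlenB])]
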